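-- pv_equiv track=rewrite | github.com/Graysssss/Daily-Learning | Capstone/translation.py | data_transform
-- ===== SOURCE A (Python) =====
-- def data_transform(list_TLSlength):
--     data_transformed = []
--     for length in list_TLSlength:
--         l = length
--         negative = 1
--         if l < 0:
--             negative = -1
--             l = -1
--         while l >= 512:
--             l = l - 512
--             data_transformed.append(negative)
--     return data_transformed
-- ===== SOURCE B (Python) =====
-- def data_transform(list_TLSlength):
--     return [1 for length in list_TLSlength for _ in range(length // 512)]
-- ===== Notes on version B (the rewrite author's own statement) =====
-- stated objective: simpler
-- what changed: Replaces the per-element repeated-subtraction while loop (and the negative-sign bookkeeping that can never emit, since negative lengths are reset to -1) with a single comprehension emitting length // 512 ones per element; floor division makes negative lengths contribute nothing.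
import Mathlib
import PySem

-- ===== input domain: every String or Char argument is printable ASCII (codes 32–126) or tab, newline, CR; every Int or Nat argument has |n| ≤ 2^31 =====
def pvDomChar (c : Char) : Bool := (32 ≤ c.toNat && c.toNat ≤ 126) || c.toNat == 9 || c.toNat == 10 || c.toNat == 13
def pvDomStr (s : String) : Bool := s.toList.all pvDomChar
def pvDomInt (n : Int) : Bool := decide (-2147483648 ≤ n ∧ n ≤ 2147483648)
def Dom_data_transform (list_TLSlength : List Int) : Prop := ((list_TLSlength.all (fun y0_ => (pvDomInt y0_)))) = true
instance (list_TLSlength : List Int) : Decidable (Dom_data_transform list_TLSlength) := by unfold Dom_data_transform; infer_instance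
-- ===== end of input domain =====

-- B replaces A's repeated-subtraction while loop with one comprehension of length // 512 ones per element (simpler; return value only).

-- ===== PORT A =====
-- inner 'while l >= 512: l = l - 512; data_transformed.append(negative)'
def dtWhile (l : Int) (negative : Int) (acc : List Int) : List Int :=
  if l ≥ 512 then dtWhile (l - 512) negative (acc ++ [negative]) else acc
termination_by l.toNat
decreasing_by omega

def data_transform (list_TLSlength : List Int) : List Int :=
  list_TLSlength.foldl
    (fun acc length =>
      if length < 0 then dtWhile (-1) (-1) acc else dtWhile length 1 acc)
    []

-- ===== PORT B =====
def data_transform_alt (list_TLSlength : List Int) : List Int :=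
  list_TLSlength.flatMap
    (fun length => (PySem.List.pyRange 0 (PySem.Int.floordiv length 512) 1).map (fun _ => (1 : Int)))

-- ===== PRECONDITION & SPEC =====
def Spec_data_transform (list_TLSlength : List Int) (out : List Int) : Prop := out = data_transform_alt list_TLSlength
instance (list_TLSlength : List Int) (out : List Int) : Decidable (Spec_data_transform list_TLSlength out) := by unfold Spec_data_transform; infer_instance

-- ===== CLAIM (what is proved, stated in full; the proofs are below) =====
def Claim_equal_data_transform : Prop := ∀ (list_TLSlength : List Int), Dom_data_transform list_TLSlength → Spec_data_transform list_TLSlength (data_transform list_TLSlength)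

-- ===== LEMMAS AND PROOFS =====

-- the while loop appends exactly (l // 512) copies of negative (none when l < 512)
lemma dtWhile_eq (l negative : Int) (acc : List Int) :
    dtWhile l negative acc = acc ++ List.replicate (PySem.Int.floordiv l 512).toNat negative := by
  rw [PySem.Int.floordiv_eq_ediv_of_pos (by norm_num : (0:Int) < 512)]
  induction hn : l.toNat using Nat.strong_induction_on generalizing l acc with
  | _ n ih =>
    rw [dtWhile]
    split
    · rename_i h
      rw [ih ((l - 512).toNat) (by omega) (l - 512) (acc ++ [negative]) rfl]
      have h2 : (l / 512).toNat = ((l - 512) / 512).toNat + 1 := by omega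
      rw [h2, List.replicate_succ, List.append_assoc]
      rfl
    · rename_i h
      have : (l / 512).toNat = 0 := by omega
      simp [this]

-- one element's contribution in B is the same replicate
lemma elem_eq (length : Int) :
    (PySem.List.pyRange 0 (PySem.Int.floordiv length 512) 1).map (fun _ => (1 : Int))
      = List.replicate (PySem.Int.floordiv length 512).toNat 1 := by
  rw [List.eq_replicate_iff]
  constructor
  · simp [PySem.List.length_pyRange_one]
  · intro b hb
    simp at hb
    exact hb.2

theorem data_transform_spec : Claim_equal_data_transform := by
  intro xs _
  unfold Spec_data_transform data_transform data_transform_alt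
  have hfun : (fun (acc : List Int) (length : Int) =>
        if length < 0 then dtWhile (-1) (-1) acc else dtWhile length 1 acc)
      = (fun acc length =>
        acc ++ (PySem.List.pyRange 0 (PySem.Int.floordiv length 512) 1).map (fun _ => (1 : Int))) := by
    funext acc length
    split
    · rename_i h
      rw [dtWhile_eq, elem_eq]
      have hneg : PySem.Int.floordiv length 512 < 0 := by
        rw [PySem.Int.floordiv_eq_ediv_of_pos (by norm_num : (0:Int) < 512)]
        omega
      have : (PySem.Int.floordiv (-1) 512).toNat = 0 := by decide
      have h2 : (PySem.Int.floordiv length 512).toNat = 0 := by omega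
      rw [this, h2]
      simp
    · rw [dtWhile_eq, elem_eq]
  rw [hfun, PySem.List.foldl_append_eq_flatMap]
  simp
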